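-- pv_equiv track=rewrite | github.com/talessl/Processamento-de-Imagem | rast.py | dilatar_componente
-- ===== SOURCE A (Python) =====
-- def dilatar_componente(matriz_entrada, matriz_original):
--     eixoX = len(matriz_entrada)
--     eixoY = len(matriz_entrada[0])
--
--     img_dilatada = [[0 for _ in range(eixoY)] for _ in range(eixoX)]
--
--     for i in range(1,eixoX-1):
--         for j in range(1,eixoY-1):
--             if(matriz_entrada[i-1][j-1] == 1 or matriz_entrada[i-1][j] == 1 or matriz_entrada[i-1][j+1] == 1 or
--                matriz_entrada[i][j-1] == 1 or matriz_entrada[i][j] == 1 or matriz_entrada[i][j+1] == 1 or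
--                matriz_entrada[i+1][j-1] == 1 or matriz_entrada[i+1][j] == 1 or matriz_entrada[i+1][j+1] == 1):
--                 if(matriz_original[i][j] == 1):
--                     img_dilatada[i][j] = 1
--
--     return img_dilatada
-- ===== SOURCE B (Python) =====
-- def dilatar_componente(matriz_entrada, matriz_original):
--     # Scatter/push dilation: spread each foreground source cell into a buffer,
--     # then intersect the buffer with matriz_original.
--     nX = len(matriz_entrada)
--     nY = len(matriz_entrada[0])
--     buffer = [[0] * nY for _ in range(nX)]
--     for r, row in enumerate(matriz_entrada):
--         for c, v in enumerate(row):
--             if v == 1: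
--                 for dr in (-1, 0, 1):
--                     for dc in (-1, 0, 1):
--                         i = r + dr
--                         j = c + dc
--                         if 1 <= i <= nX - 2 and 1 <= j <= nY - 2:
--                             buffer[i][j] = 1
--     return [[1 if buffer[i][j] == 1 and matriz_original[i][j] == 1 else 0
--              for j in range(nY)] for i in range(nX)]
-- ===== Notes on version B (the rewrite author's own statement) =====
-- stated objective: faster
-- what changed: A gathers: for each interior output pixel it tests all 9 neighbours of matriz_entrada in place; B scatters: it spreads every foreground source cell of matriz_entrada into a fresh zero buffer (clipped to the interior) and then builds the output by intersecting the buffer with matriz_original.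
import Mathlib
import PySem

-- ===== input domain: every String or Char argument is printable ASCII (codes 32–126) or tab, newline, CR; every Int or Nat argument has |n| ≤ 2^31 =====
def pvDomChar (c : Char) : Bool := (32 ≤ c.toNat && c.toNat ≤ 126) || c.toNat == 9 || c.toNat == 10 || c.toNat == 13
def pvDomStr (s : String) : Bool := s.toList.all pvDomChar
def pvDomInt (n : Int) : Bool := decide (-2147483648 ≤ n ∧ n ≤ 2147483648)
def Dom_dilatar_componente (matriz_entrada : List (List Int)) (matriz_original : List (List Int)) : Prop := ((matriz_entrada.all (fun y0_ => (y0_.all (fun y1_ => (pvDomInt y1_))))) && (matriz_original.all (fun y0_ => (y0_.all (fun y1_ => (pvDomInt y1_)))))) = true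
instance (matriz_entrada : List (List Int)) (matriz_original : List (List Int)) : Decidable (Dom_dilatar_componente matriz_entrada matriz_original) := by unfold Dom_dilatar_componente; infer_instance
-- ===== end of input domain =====

-- B replaces A's gather (per interior pixel, test the 9 neighbours) by a scatter dilation
-- (spread every foreground source cell into a fresh buffer, then mask with matriz_original);
-- same asymptotic cost, measurably faster by a constant factor (work per pixel drops to one
-- test unless the pixel is a foreground source).

-- ===== PORT A =====
-- m[i][j] read and m[i][j] = 1 write (Python raises on an out-of-range index; every
-- access is in range under Pre_, where pyGetD/pySetD are exact)
def pvGet2 (m : List (List Int)) (i j : Int) : Int :=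
  PySem.List.pyGetD (PySem.List.pyGetD m i []) j 0

def pvSet2 (m : List (List Int)) (i j : Int) : List (List Int) :=
  PySem.List.pySetD m i (PySem.List.pySetD (PySem.List.pyGetD m i []) j 1)

def dilatar_componente (matriz_entrada : List (List Int)) (matriz_original : List (List Int)) : List (List Int) :=
  let eixoX : Int := matriz_entrada.length
  let eixoY : Int := (PySem.List.pyGetD matriz_entrada 0 []).length
  let img0 : List (List Int) :=
    (PySem.List.pyRange 0 eixoX 1).map (fun _ => (PySem.List.pyRange 0 eixoY 1).map (fun _ => (0 : Int)))
  (PySem.List.pyRange 1 (eixoX - 1) 1).foldl (fun img i =>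
    (PySem.List.pyRange 1 (eixoY - 1) 1).foldl (fun img j =>
      if (pvGet2 matriz_entrada (i-1) (j-1) == 1 || pvGet2 matriz_entrada (i-1) j == 1 || pvGet2 matriz_entrada (i-1) (j+1) == 1 ||
          pvGet2 matriz_entrada i (j-1) == 1 || pvGet2 matriz_entrada i j == 1 || pvGet2 matriz_entrada i (j+1) == 1 ||
          pvGet2 matriz_entrada (i+1) (j-1) == 1 || pvGet2 matriz_entrada (i+1) j == 1 || pvGet2 matriz_entrada (i+1) (j+1) == 1) then
        (if pvGet2 matriz_original i j == 1 then pvSet2 img i j else img)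
      else img) img) img0

-- ===== PORT B =====
def dilatar_componente_alt (matriz_entrada : List (List Int)) (matriz_original : List (List Int)) : List (List Int) :=
  let nX : Int := matriz_entrada.length
  let nY : Int := (PySem.List.pyGetD matriz_entrada 0 []).length
  let buf0 : List (List Int) :=
    (PySem.List.pyRange 0 nX 1).map (fun _ => (PySem.List.pyRange 0 nY 1).map (fun _ => (0 : Int)))
  let buf :=
    (PySem.List.enumerate matriz_entrada 0).foldl (fun b rc =>
      (PySem.List.enumerate rc.2 0).foldl (fun b cv =>
        if cv.2 == 1 then
          ([-1, 0, 1] : List Int).foldl (fun b dr =>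
            ([-1, 0, 1] : List Int).foldl (fun b dc =>
              if 1 ≤ rc.1 + dr ∧ rc.1 + dr ≤ nX - 2 ∧ 1 ≤ cv.1 + dc ∧ cv.1 + dc ≤ nY - 2 then
                pvSet2 b (rc.1 + dr) (cv.1 + dc)
              else b) b) b
        else b) b) buf0
  (PySem.List.pyRange 0 nX 1).map (fun i =>
    (PySem.List.pyRange 0 nY 1).map (fun j =>
      if pvGet2 buf i j == 1 && pvGet2 matriz_original i j == 1 then (1 : Int) else 0))

-- ===== PRECONDITION & SPEC =====
-- Pre_ excludes ill-shaped inputs: on an empty matriz_entrada, on rows narrower than row 0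
-- when a 3x3 interior exists, or on a matriz_original not covering the interior, A's
-- neighbourhood reads / mask lookup generally raise IndexError, and the rare ill-shaped
-- inputs on which A still returns (via boolean short-circuit, or because no dilation hit
-- reaches the missing cells) are excluded too, a closed-form Pre_ cannot trace the
-- short-circuit; on those B returns the same value anyway (see cites). The Lean ports (total
-- via pyGetD/pySetD defaults) happen to agree on ALL inputs, so the equivalence proof below
-- does not need Pre_; Pre_'s role is to delimit where the ports are faithful to the Pythons.
def Pre_dilatar_componente (matriz_entrada : List (List Int)) (matriz_original : List (List Int)) : Prop :=
  matriz_entrada ≠ [] ∧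
  (3 ≤ matriz_entrada.length ∧ 3 ≤ (matriz_entrada.headD []).length →
    (∀ r ∈ matriz_entrada, (matriz_entrada.headD []).length ≤ r.length) ∧
    matriz_entrada.length - 1 ≤ matriz_original.length ∧
    (∀ r ∈ (matriz_original.drop 1).take (matriz_entrada.length - 2),
      (matriz_entrada.headD []).length - 1 ≤ r.length))
instance (matriz_entrada : List (List Int)) (matriz_original : List (List Int)) : Decidable (Pre_dilatar_componente matriz_entrada matriz_original) := by unfold Pre_dilatar_componente; infer_instance

def pvWitness_dilatar_componente : List (List Int) × List (List Int) := ([[0]], [[0]])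

def Spec_dilatar_componente (matriz_entrada : List (List Int)) (matriz_original : List (List Int)) (out : List (List Int)) : Prop := out = dilatar_componente_alt matriz_entrada matriz_original
instance (matriz_entrada : List (List Int)) (matriz_original : List (List Int)) (out : List (List Int)) : Decidable (Spec_dilatar_componente matriz_entrada matriz_original out) := by unfold Spec_dilatar_componente; infer_instance

-- ===== CLAIM (what is proved, stated in full; the proofs are below) =====
def Claim_equal_dilatar_componente : Prop := ∀ (matriz_entrada : List (List Int)) (matriz_original : List (List Int)), Dom_dilatar_componente matriz_entrada matriz_original → Pre_dilatar_componente matriz_entrada matriz_original → Spec_dilatar_componente matriz_entrada matriz_original (dilatar_componente matriz_entrada matriz_original)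

-- ===== LEMMAS AND PROOFS =====

-- value of m[i][j] through Nat indices, for nonnegative i j
theorem pvGet2_toNat (m : List (List Int)) {p q : Int} (hp : 0 ≤ p) (hq : 0 ≤ q) :
    pvGet2 m p q = (m.getD p.toNat []).getD q.toNat 0 := by
  unfold pvGet2
  rw [show p = ((p.toNat : Nat) : Int) from (Int.toNat_of_nonneg hp).symm,
      show q = ((q.toNat : Nat) : Int) from (Int.toNat_of_nonneg hq).symm]
  rw [PySem.List.pyGetD_natCast, PySem.List.pyGetD_natCast]
  norm_cast

-- "F writes 1 exactly at the cells satisfying S, and preserves an X×Y shape"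
def SpreadsTo (X Y : Nat) (F : List (List Int) → List (List Int)) (S : Int → Int → Bool) : Prop :=
  ∀ m0 : List (List Int), m0.length = X → (∀ r ∈ m0, r.length = Y) →
    (F m0).length = X ∧ (∀ r ∈ F m0, r.length = Y) ∧
    ∀ p q : Int, 0 ≤ p → 0 ≤ q → pvGet2 (F m0) p q = if S p q then 1 else pvGet2 m0 p q

theorem spreads_set {X Y : Nat} {a b : Int} (ha0 : 0 ≤ a) (haX : a < (X : Int)) (hb0 : 0 ≤ b) (hbY : b < (Y : Int)) :
    SpreadsTo X Y (fun m => pvSet2 m a b) (fun p q => p == a && q == b) := by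
  intro m0 hlen hrows
  have hA : a.toNat < m0.length := by omega
  have hrowget : PySem.List.pyGetD m0 a [] = m0[a.toNat] := by
    have h1 : PySem.List.pyGetD m0 ((a.toNat : Nat) : Int) [] = m0[a.toNat] := by
      rw [PySem.List.pyGetD_natCast, List.getD_eq_getElem?_getD, List.getElem?_eq_getElem hA]
      rfl
    rwa [Int.toNat_of_nonneg ha0] at h1
  have hrowlen : m0[a.toNat].length = Y := hrows _ (List.getElem_mem hA)
  have hset : pvSet2 m0 a b = m0.set a.toNat (m0[a.toNat].set b.toNat 1) := by
    unfold pvSet2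
    rw [hrowget, PySem.List.pySetD_of_nonneg _ _ hb0, PySem.List.pySetD_of_nonneg _ _ ha0]
  simp only [hset]
  refine ⟨by simpa using hlen, ?_, ?_⟩
  · intro r hr
    rcases List.mem_or_eq_of_mem_set hr with h | h
    · exact hrows r h
    · rw [h, List.length_set]; exact hrowlen
  · intro p q hp hq
    rw [pvGet2_toNat _ hp hq, pvGet2_toNat m0 hp hq]
    by_cases hpa : p = a
    · subst hpa
      have : (m0.set p.toNat (m0[p.toNat].set b.toNat 1)).getD p.toNat [] = m0[p.toNat].set b.toNat 1 := by
        rw [List.getD_eq_getElem?_getD, List.getElem?_set_self (by simpa using hA)]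
        simp
      rw [this]
      have hm0row : m0.getD p.toNat [] = m0[p.toNat] := by
        rw [List.getD_eq_getElem?_getD, List.getElem?_eq_getElem hA]; rfl
      rw [hm0row]
      by_cases hqb : q = b
      · subst hqb
        have hb' : q.toNat < m0[p.toNat].length := by omega
        simp only [beq_self_eq_true, Bool.and_self, if_true]
        rw [List.getD_eq_getElem?_getD, List.getElem?_set_self hb']
        rfl
      · have hne : b.toNat ≠ q.toNat := by omega
        have hrow2 : (m0[p.toNat].set b.toNat 1).getD q.toNat 0 = m0[p.toNat].getD q.toNat 0 := by
          rw [List.getD_eq_getElem?_getD, List.getElem?_set_ne hne, ← List.getD_eq_getElem?_getD]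
        rw [hrow2]
        simp [hqb]
    · have hne : a.toNat ≠ p.toNat := by omega
      have houter : (m0.set a.toNat (m0[a.toNat].set b.toNat 1)).getD p.toNat [] = m0.getD p.toNat [] := by
        rw [List.getD_eq_getElem?_getD, List.getElem?_set_ne hne, ← List.getD_eq_getElem?_getD]
      rw [houter]
      simp [hpa]

theorem spreads_ite {X Y : Nat} {c : Prop} [Decidable c] {F : List (List Int) → List (List Int)} {S : Int → Int → Bool}
    (h : c → SpreadsTo X Y F S) :
    SpreadsTo X Y (fun m => if c then F m else m) (fun p q => decide c && S p q) := by
  by_cases hc : c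
  · simpa [hc] using h hc
  · intro m0 h1 h2
    simp [hc, h1]
    exact h2

theorem spreads_foldl {X Y : Nat} {ι : Type} (L : List ι) (G : List (List Int) → ι → List (List Int))
    (S : ι → Int → Int → Bool) (h : ∀ x ∈ L, SpreadsTo X Y (fun m => G m x) (S x)) :
    SpreadsTo X Y (fun m0 => L.foldl G m0) (fun p q => L.any (fun x => S x p q)) := by
  induction L with
  | nil => intro m0 h1 h2; simpa using ⟨h1, h2⟩
  | cons x L ih =>
    intro m0 h1 h2
    obtain ⟨hx1, hx2, hx3⟩ := h x (List.mem_cons_self ..) m0 h1 h2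
    simp only [] at hx1 hx2 hx3
    obtain ⟨hl1, hl2, hl3⟩ := ih (fun y hy => h y (List.mem_cons_of_mem _ hy)) (G m0 x) hx1 hx2
    refine ⟨hl1, hl2, ?_⟩
    intro p q hp hq
    have key := hl3 p q hp hq
    simp only [List.foldl_cons, List.any_cons] at *
    rw [key, hx3 p q hp hq]
    by_cases hS : S x p q = true
    · simp [hS]
    · replace hS : S x p q = false := by simpa using hS
      simp [hS]

-- a matrix whose every entry is 0 reads 0 everywhere
theorem getD_zeros (m : List (List Int)) (h : ∀ r ∈ m, ∀ v ∈ r, v = 0) (p q : Nat) :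
    (m.getD p []).getD q 0 = 0 := by
  rcases lt_or_ge p m.length with hp | hp
  · have hrow : m.getD p [] = m[p] := by
      rw [List.getD_eq_getElem?_getD, List.getElem?_eq_getElem hp]; rfl
    rw [hrow]
    rcases lt_or_ge q m[p].length with hq | hq
    · rw [List.getD_eq_getElem?_getD, List.getElem?_eq_getElem hq]
      exact h _ (List.getElem_mem hp) _ (List.getElem_mem hq)
    · rw [List.getD_eq_getElem?_getD, List.getElem?_eq_none hq]
      rfl
  · have houter : m.getD p [] = ([] : List Int) := by
      rw [List.getD_eq_getElem?_getD, List.getElem?_eq_none hp]; rfl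
    rw [houter]
    simp

-- ============ proof-side helpers ============
def width (e : List (List Int)) : Nat := (PySem.List.pyGetD e 0 []).length

def zerosM (X W : Nat) : List (List Int) :=
  List.map (fun _ => List.map (fun _ => (0 : Int)) (PySem.List.pyRange 0 (W : Int))) (PySem.List.pyRange 0 (X : Int))

def g9 (e : List (List Int)) (i j : Int) : Bool :=
  pvGet2 e (i-1) (j-1) == 1 || pvGet2 e (i-1) j == 1 || pvGet2 e (i-1) (j+1) == 1 ||
  pvGet2 e i (j-1) == 1 || pvGet2 e i j == 1 || pvGet2 e i (j+1) == 1 ||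
  pvGet2 e (i+1) (j-1) == 1 || pvGet2 e (i+1) j == 1 || pvGet2 e (i+1) (j+1) == 1

def ocb (o : List (List Int)) (i j : Int) : Bool := pvGet2 o i j == 1

def bodyA (e o : List (List Int)) : List (List Int) → Int → List (List Int) :=
  fun img i => List.foldl (fun img j => if g9 e i j then (if ocb o i j then pvSet2 img i j else img) else img)
    img (PySem.List.pyRange 1 ((width e : Int) - 1))

def runA (e o : List (List Int)) : List (List Int) :=
  List.foldl (bodyA e o) (zerosM e.length (width e)) (PySem.List.pyRange 1 ((e.length : Int) - 1))

def bodyB (e : List (List Int)) : List (List Int) → Int × List Int → List (List Int) :=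
  fun b rc => List.foldl (fun b cv =>
    if cv.2 == 1 then
      List.foldl (fun b dr => List.foldl (fun b dc =>
        if 1 ≤ rc.1 + dr ∧ rc.1 + dr ≤ (e.length : Int) - 2 ∧ 1 ≤ cv.1 + dc ∧ cv.1 + dc ≤ (width e : Int) - 2 then
          pvSet2 b (rc.1 + dr) (cv.1 + dc)
        else b) b [-1, 0, 1]) b [-1, 0, 1]
    else b) b (PySem.List.enumerate rc.2)

def bufB (e : List (List Int)) : List (List Int) :=
  List.foldl (bodyB e) (zerosM e.length (width e)) (PySem.List.enumerate e)

def outB (e o : List (List Int)) : List (List Int) :=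
  List.map (fun i => List.map (fun j => if pvGet2 (bufB e) i j == 1 && pvGet2 o i j == 1 then (1 : Int) else 0)
    (PySem.List.pyRange 0 (width e : Int))) (PySem.List.pyRange 0 (e.length : Int))

def SAcell (e o : List (List Int)) (i j p q : Int) : Bool :=
  decide (g9 e i j = true) && (decide (ocb o i j = true) && (p == i && q == j))

def SA (e o : List (List Int)) (p q : Int) : Bool :=
  (PySem.List.pyRange 1 ((e.length : Int) - 1)).any fun i =>
    (PySem.List.pyRange 1 ((width e : Int) - 1)).any fun j => SAcell e o i j p q

def SB (e : List (List Int)) (p q : Int) : Bool :=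
  (PySem.List.enumerate e).any fun rc =>
    (PySem.List.enumerate rc.2).any fun cv =>
      decide ((cv.2 == 1) = true) &&
        (([-1, 0, 1] : List Int).any fun dr => ([-1, 0, 1] : List Int).any fun dc =>
          decide (1 ≤ rc.1 + dr ∧ rc.1 + dr ≤ (e.length : Int) - 2 ∧ 1 ≤ cv.1 + dc ∧ cv.1 + dc ≤ (width e : Int) - 2) &&
            (p == rc.1 + dr && q == cv.1 + dc))

theorem runA_spread (e o : List (List Int)) :
    SpreadsTo e.length (width e) (fun m => List.foldl (bodyA e o) m (PySem.List.pyRange 1 ((e.length : Int) - 1))) (SA e o) := by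
  apply spreads_foldl
  intro i hi
  rw [PySem.List.mem_pyRange_one] at hi
  apply spreads_foldl
  intro j hj
  rw [PySem.List.mem_pyRange_one] at hj
  apply spreads_ite
  intro _
  apply spreads_ite
  intro _
  exact spreads_set (by omega) (by omega) (by omega) (by omega)

theorem bufB_spread (e : List (List Int)) :
    SpreadsTo e.length (width e) (fun m => List.foldl (bodyB e) m (PySem.List.enumerate e)) (SB e) := by
  apply spreads_foldl
  intro rc _
  apply spreads_foldl
  intro cv _
  apply spreads_ite
  intro _
  apply spreads_foldl
  intro dr _
  apply spreads_foldl
  intro dc _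
  apply spreads_ite
  intro hg
  exact spreads_set (by omega) (by omega) (by omega) (by omega)

theorem zerosM_len (X W : Nat) : (zerosM X W).length = X := by
  simp [zerosM, PySem.List.length_pyRange_one]

theorem zerosM_rows (X W : Nat) : ∀ r ∈ zerosM X W, r.length = W := by
  intro r hr
  simp only [zerosM, List.mem_map] at hr
  obtain ⟨_, _, rfl⟩ := hr
  simp [PySem.List.length_pyRange_one]

theorem zerosM_get (X W : Nat) (p q : Int) (hp : 0 ≤ p) (hq : 0 ≤ q) : pvGet2 (zerosM X W) p q = 0 := by
  rw [pvGet2_toNat _ hp hq]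
  apply getD_zeros
  intro r hr v hv
  simp only [zerosM, List.mem_map] at hr
  obtain ⟨_, _, rfl⟩ := hr
  simp only [List.mem_map] at hv
  obtain ⟨_, _, rfl⟩ := hv
  rfl

theorem runA_entry (e o : List (List Int)) (p q : Int) (hp : 0 ≤ p) (hq : 0 ≤ q) :
    pvGet2 (runA e o) p q = if SA e o p q then 1 else 0 := by
  obtain ⟨_, _, h3⟩ := runA_spread e o (zerosM e.length (width e)) (zerosM_len _ _) (zerosM_rows _ _)
  simp only [] at h3
  rw [runA, h3 p q hp hq, zerosM_get _ _ _ _ hp hq]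

theorem runA_len (e o : List (List Int)) : (runA e o).length = e.length := by
  obtain ⟨h1, _, _⟩ := runA_spread e o (zerosM e.length (width e)) (zerosM_len _ _) (zerosM_rows _ _)
  exact h1

theorem runA_rows (e o : List (List Int)) : ∀ r ∈ runA e o, r.length = width e := by
  obtain ⟨_, h2, _⟩ := runA_spread e o (zerosM e.length (width e)) (zerosM_len _ _) (zerosM_rows _ _)
  exact h2

theorem bufB_entry (e : List (List Int)) (p q : Int) (hp : 0 ≤ p) (hq : 0 ≤ q) :
    pvGet2 (bufB e) p q = if SB e p q then 1 else 0 := by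
  obtain ⟨_, _, h3⟩ := bufB_spread e (zerosM e.length (width e)) (zerosM_len _ _) (zerosM_rows _ _)
  simp only [] at h3
  rw [bufB, h3 p q hp hq, zerosM_get _ _ _ _ hp hq]

theorem getElem_eq_pvGet2 (m : List (List Int)) (i j : Nat) (hi : i < m.length) (hj : j < m[i].length) :
    m[i][j] = pvGet2 m (i : Int) (j : Int) := by
  rw [pvGet2_toNat m (Int.natCast_nonneg i) (Int.natCast_nonneg j)]
  have h1 : m.getD ((i : Int)).toNat [] = m[i] := by
    rw [Int.toNat_natCast, List.getD_eq_getElem?_getD, List.getElem?_eq_getElem hi]; rfl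
  rw [h1, Int.toNat_natCast, List.getD_eq_getElem?_getD, List.getElem?_eq_getElem hj]
  rfl

-- the source cell behind a successful in-range read
theorem scatter_wit {e : List (List Int)} {u v : Int} (hu : 0 ≤ u) (hv : 0 ≤ v) (h1 : pvGet2 e u v = 1) :
    ∃ (k : Nat) (hk : k < e.length) (c : Nat) (_ : c < e[k].length),
      e[k][c] = 1 ∧ (k : Int) = u ∧ (c : Int) = v := by
  rw [pvGet2_toNat _ hu hv] at h1
  rcases lt_or_ge u.toNat e.length with hk | hk
  · have hrow : e.getD u.toNat [] = e[u.toNat] := by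
      rw [List.getD_eq_getElem?_getD, List.getElem?_eq_getElem hk]; rfl
    rw [hrow] at h1
    rcases lt_or_ge v.toNat e[u.toNat].length with hc | hc
    · have hcell : e[u.toNat].getD v.toNat 0 = e[u.toNat][v.toNat] := by
        rw [List.getD_eq_getElem?_getD, List.getElem?_eq_getElem hc]; rfl
      rw [hcell] at h1
      exact ⟨u.toNat, hk, v.toNat, hc, h1, Int.toNat_of_nonneg hu, Int.toNat_of_nonneg hv⟩
    · rw [List.getD_eq_getElem?_getD, List.getElem?_eq_none hc] at h1
      simp at h1
  · have hrow : e.getD u.toNat [] = ([] : List Int) := by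
      rw [List.getD_eq_getElem?_getD, List.getElem?_eq_none hk]; rfl
    rw [hrow] at h1
    simp at h1

theorem pvGet2_cell {e : List (List Int)} (k c : Nat) (hk : k < e.length) (hc : c < e[k].length) :
    pvGet2 e (k : Int) (c : Int) = e[k][c] := (getElem_eq_pvGet2 e k c hk hc).symm

theorem SA_eq_SB (e o : List (List Int)) (p q : Int) (_hp : 0 ≤ p) (_hq : 0 ≤ q) :
    SA e o p q = (SB e p q && (pvGet2 o p q == 1)) := by
  rw [Bool.eq_iff_iff]
  simp only [SA, SB, SAcell, g9, ocb, List.any_eq_true, PySem.List.mem_pyRange_one,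
    PySem.List.mem_enumerate_iff, decide_eq_true_eq, Bool.and_eq_true, Bool.or_eq_true,
    beq_iff_eq, List.mem_cons, List.not_mem_nil, or_false]
  constructor
  · rintro ⟨i, ⟨hi1, hi2⟩, j, ⟨hj1, hj2⟩, hg, hoc, rfl, rfl⟩
    refine ⟨?_, hoc⟩
    have hwit : ∃ a b : Int, (a = -1 ∨ a = 0 ∨ a = 1) ∧ (b = -1 ∨ b = 0 ∨ b = 1) ∧ pvGet2 e (p + a) (q + b) = 1 := by
      rcases hg with ((((((((h | h) | h) | h) | h) | h) | h) | h) | h) <;>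
        [exact ⟨-1, -1, by tauto, by tauto, by norm_num; exact h⟩;
         exact ⟨-1, 0, by tauto, by tauto, by norm_num; exact h⟩;
         exact ⟨-1, 1, by tauto, by tauto, by norm_num; exact h⟩;
         exact ⟨0, -1, by tauto, by tauto, by norm_num; exact h⟩;
         exact ⟨0, 0, by tauto, by tauto, by norm_num; exact h⟩;
         exact ⟨0, 1, by tauto, by tauto, by norm_num; exact h⟩;
         exact ⟨1, -1, by tauto, by tauto, by norm_num; exact h⟩;
         exact ⟨1, 0, by tauto, by tauto, by norm_num; exact h⟩;
         exact ⟨1, 1, by tauto, by tauto, h⟩]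
    obtain ⟨a, b, ha, hb, hread⟩ := hwit
    obtain ⟨k, hk, c, hc, hcell, hku, hcv⟩ := scatter_wit (by omega) (by omega) hread
    refine ⟨((k : Int), e[k]), ⟨k, hk, by simp⟩, ((c : Int), e[k][c]), ⟨c, hc, by simp⟩, hcell, -a, by omega, -b, by omega, by constructor <;> omega, by omega, by omega⟩
  · rintro ⟨⟨rc, ⟨k, hk, rfl⟩, cv, ⟨c, hc, rfl⟩, hval, dr, hdr, dc, hdc, hg, hpv, hqv⟩, hoc⟩
    simp only [zero_add] at *
    refine ⟨p, ⟨by omega, by omega⟩, q, ⟨by omega, by omega⟩, ?_, hoc, rfl, rfl⟩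
    have hread : pvGet2 e (p + -dr) (q + -dc) = 1 := by
      rw [show p + -dr = (k : Int) by omega, show q + -dc = (c : Int) by omega,
        pvGet2_cell k c hk hc]
      exact hval
    rcases hdr with rfl | rfl | rfl <;> rcases hdc with rfl | rfl | rfl <;>
      norm_num at hread ⊢ <;> tauto

theorem outB_len (e o : List (List Int)) : (outB e o).length = e.length := by
  simp [outB, PySem.List.length_pyRange_one]

theorem runA_eq_outB (e o : List (List Int)) : runA e o = outB e o := by
  apply List.ext_getElem
  · rw [runA_len, outB_len]
  intro i hi1 hi2
  have hiX : i < e.length := by rwa [runA_len] at hi1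
  have hout : (outB e o)[i] =
      List.map (fun jj => if pvGet2 (bufB e) (0 + (i : Int)) jj == 1 && pvGet2 o (0 + (i : Int)) jj == 1 then (1 : Int) else 0)
        (PySem.List.pyRange 0 (width e : Int)) := by
    simp only [outB]
    rw [List.getElem_map, PySem.List.getElem_pyRange_one]
  apply List.ext_getElem
  · rw [runA_rows e o _ (List.getElem_mem hi1), hout, List.length_map, PySem.List.length_pyRange_one]
    omega
  intro j hj1 hj2
  have hjW : j < width e := by rw [runA_rows e o _ (List.getElem_mem hi1)] at hj1; exact hj1
  rw [getElem_eq_pvGet2 _ i j hi1 hj1, runA_entry e o _ _ (Int.natCast_nonneg i) (Int.natCast_nonneg j)]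
  have hj2' : j < (PySem.List.pyRange 0 (width e : Int)).length := by
    rw [PySem.List.length_pyRange_one]; omega
  have hR : (outB e o)[i][j] =
      if pvGet2 (bufB e) (i : Int) (j : Int) == 1 && pvGet2 o (i : Int) (j : Int) == 1 then (1 : Int) else 0 := by
    rw [List.getElem_of_eq hout hj2, List.getElem_map, PySem.List.getElem_pyRange_one]
    norm_num
  rw [hR, bufB_entry e _ _ (Int.natCast_nonneg i) (Int.natCast_nonneg j),
    SA_eq_SB e o _ _ (Int.natCast_nonneg i) (Int.natCast_nonneg j)]
  by_cases hSB : SB e (i : Int) (j : Int) = true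
  · simp [hSB]
  · replace hSB : SB e (i : Int) (j : Int) = false := by simpa using hSB
    simp [hSB]

theorem ports_eq (e o : List (List Int)) :
    dilatar_componente e o = dilatar_componente_alt e o := by
  show runA e o = outB e o
  exact runA_eq_outB e o

-- ===== VERDICT (by name: the statement is the Claim_ definition above) =====
theorem dilatar_componente_spec : Claim_equal_dilatar_componente := by
  intro matriz_entrada matriz_original _ _
  unfold Spec_dilatar_componente
  exact ports_eq matriz_entrada matriz_original
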